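-- pv_equiv track=rewrite | github.com/kanitsch/ASD | ubiegle_lata/asd-main-2020-2021/2020-2021/zad1_t0.py | tanagram
-- ===== SOURCE A (Python) =====
-- def counting_sort(A,k):
--     n=len(A)
--     B=[None for _ in range(n)]
--     C=[0 for _ in range(k)]
--     for x in A:
--         C[x[0]]+=1
--     for i in range(1,k):
--         C[i]+=C[i-1]
--     for i in range(n-1,-1,-1):
--         B[C[A[i][0]]-1]=A[i]
--         C[A[i][0]]-=1
--     return B
--
-- def tanagram(x,y,t):
--     if len(x)!=len(y):
--         return False
--     n=len(x)
--     A=[0 for _ in range(n)]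
--     B=[0 for _ in range(n)]
--     for i in range(n):
--         A[i]=[ord(x[i])-ord('a'),i]
--         B[i]=[ord(y[i])-ord('a'),i]
--     A=counting_sort(A,26)
--     B=counting_sort(B,26)
--     for i in range(n):
--         if abs(A[i][1]-B[i][1])>t:
--             return False
--     return True
-- ===== SOURCE B (Python) =====
-- def tanagram(x, y, t):
--     if len(x) != len(y):
--         return False
--     posx = [[] for _ in range(26)]
--     posy = [[] for _ in range(26)]
--     for i, ch in enumerate(x):
--         posx[ord(ch) - 97].append(i)
--     for i, ch in enumerate(y):
--         posy[ord(ch) - 97].append(i)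
--     ax = [i for b in posx for i in b]
--     ay = [i for b in posy for i in b]
--     return all(abs(i - j) <= t for i, j in zip(ax, ay))
-- ===== Notes on version B (the rewrite author's own statement) =====
-- stated objective: simpler
-- what changed: Replaces the hand-written counting sort of (key,index) pairs (count array, prefix sums, backward placement) by direct position bucketing: 26 bucket lists of indices filled in one forward pass per string, flattened in bucket order, then one zip pass checking the displacement bound.
import Mathlib
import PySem

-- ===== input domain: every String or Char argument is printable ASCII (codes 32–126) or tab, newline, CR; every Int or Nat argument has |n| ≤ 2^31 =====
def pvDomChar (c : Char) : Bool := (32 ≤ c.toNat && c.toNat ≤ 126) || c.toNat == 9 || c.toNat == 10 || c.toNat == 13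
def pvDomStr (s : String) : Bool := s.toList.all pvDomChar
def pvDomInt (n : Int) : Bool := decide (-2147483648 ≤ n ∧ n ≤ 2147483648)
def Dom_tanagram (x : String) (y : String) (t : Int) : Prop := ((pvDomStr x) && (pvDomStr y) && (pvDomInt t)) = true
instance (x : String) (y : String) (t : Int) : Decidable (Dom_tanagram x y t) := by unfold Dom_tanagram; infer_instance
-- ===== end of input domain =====

-- B replaces A's hand-written counting sort of (key,index) pairs by direct 26-bucket position
-- lists flattened in bucket order; same return value on every input admitted by Pre_tanagram.

-- ===== PORT A =====
-- helper: Python counting_sort(A, k); B starts as [None]*n, so the result type is Option-valued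
def countingSort (A : List (Int × Int)) (k : Int) : List (Option (Int × Int)) :=
  let n : Int := (A.length : Int)
  let B0 : List (Option (Int × Int)) := (PySem.List.pyRange 0 n 1).map (fun _ => none)
  let C0 : List Int := (PySem.List.pyRange 0 k 1).map (fun _ => 0)
  let C1 : List Int := A.foldl
      (fun C p => PySem.List.pySetD C p.1 (PySem.List.pyGetD C p.1 0 + 1)) C0
  let C2 : List Int := (PySem.List.pyRange 1 k 1).foldl
      (fun C i => PySem.List.pySetD C i
        (PySem.List.pyGetD C i 0 + PySem.List.pyGetD C (i - 1) 0)) C1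
  let fin := (PySem.List.pyRange (n - 1) (-1) (-1)).foldl
      (fun (s : List (Option (Int × Int)) × List Int) i =>
        let p := PySem.List.pyGetD A i (0, 0)
        (PySem.List.pySetD s.1 (PySem.List.pyGetD s.2 p.1 0 - 1) (some p),
         PySem.List.pySetD s.2 p.1 (PySem.List.pyGetD s.2 p.1 0 - 1)))
      (B0, C2)
  fin.1

def tanagram (x : String) (y : String) (t : Int) : Bool :=
  if PySem.Str.len x ≠ PySem.Str.len y then false
  else
    let xs := x.toList
    let ys := y.toList
    let n : Int := PySem.Str.len x
    let As := (PySem.List.pyRange 0 n 1).map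
        (fun i => (((PySem.List.pyGetD xs i ' ').toNat : Int) - 97, i))
    let Bs := (PySem.List.pyRange 0 n 1).map
        (fun i => (((PySem.List.pyGetD ys i ' ').toNat : Int) - 97, i))
    let As' := countingSort As 26
    let Bs' := countingSort Bs 26
    (PySem.List.pyRange 0 n 1).all (fun i =>
      match PySem.List.pyGetD As' i none, PySem.List.pyGetD Bs' i none with
      | some p, some q => decide (¬ (|p.2 - q.2| > t))
      | _, _ => true)   -- the none branches are unreachable: under Pre_ every slot is filled

-- ===== PORT B =====
-- helper: the 26 bucket lists of positions (Python negative bucket index, as in Source B)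
def bucketPositions (cs : List Char) : List (List Int) :=
  (PySem.List.enumerate cs 0).foldl
    (fun P p =>
      PySem.List.pySetD P ((p.2.toNat : Int) - 97)
        (PySem.List.pyGetD P ((p.2.toNat : Int) - 97) [] ++ [p.1]))
    (List.replicate 26 [])

def tanagram_alt (x : String) (y : String) (t : Int) : Bool :=
  if PySem.Str.len x ≠ PySem.Str.len y then false
  else
    let ax := (bucketPositions x.toList).flatten
    let ay := (bucketPositions y.toList).flatten
    (ax.zip ay).all (fun p => decide (|p.1 - p.2| ≤ t))

-- ===== PRECONDITION & SPEC =====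
-- Pre_ excludes exactly the inputs on which A raises IndexError (equal lengths and some
-- character with code < 71 or > 122, whose bucket index falls outside the 26-entry count
-- array); B raises there too, so nothing A returns on is excluded.
def Pre_tanagram (x : String) (y : String) (t : Int) : Prop :=
  PySem.Str.len x ≠ PySem.Str.len y
  ∨ ((x.toList ++ y.toList).all (fun c => 71 ≤ c.toNat && c.toNat ≤ 122)) = true
instance (x : String) (y : String) (t : Int) : Decidable (Pre_tanagram x y t) := by
  unfold Pre_tanagram; infer_instance

def pvWitness_tanagram : String × String × Int := ("abc", "cab", 2)

def Spec_tanagram (x : String) (y : String) (t : Int) (out : Bool) : Prop := out = tanagram_alt x y t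
instance (x : String) (y : String) (t : Int) (out : Bool) : Decidable (Spec_tanagram x y t out) := by unfold Spec_tanagram; infer_instance

-- ===== CLAIM (what is proved, stated in full; the proofs are below) =====
def Claim_equal_tanagram : Prop := ∀ (x : String) (y : String) (t : Int), Dom_tanagram x y t → Pre_tanagram x y t → Spec_tanagram x y t (tanagram x y t)

-- ===== LEMMAS AND PROOFS =====

-- effective bucket index of a key e ∈ [-26, 26): Python's negative-index wraparound on a
-- 26-entry list is exactly (e mod 26)
def pvEff (e : Int) : Nat := (e % 26).toNat

-- bucket-membership predicates used by the proof (pairs key/index resp. index/char)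
def pvFb (b : Nat) (p : Int × Int) : Bool := pvEff p.1 == b
def pvFc (b : Nat) (p : Int × Char) : Bool := pvEff ((p.2.toNat : Int) - 97) == b

-- the key/index array tanagram builds from a character list
def pvKeyed (cs : List Char) : List (Int × Int) :=
  (List.range cs.length).map (fun j => (((cs.getD j ' ').toNat : Int) - 97, (j : Int)))

-- canonical form both sides reduce to: the elements grouped by bucket, in bucket order
def pvE (cs : List Char) : List (Int × Int) :=
  (List.range 26).flatMap (fun b => (pvKeyed cs).filter (pvFb b))

lemma pvIdx_norm (e : Int) (h1 : -26 ≤ e) (h2 : e < 26) :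
    PySem.List.pyIdx? 26 e = some (pvEff e) := by
  simp only [PySem.List.pyIdx?, pvEff]
  split_ifs with ha hb hc
  · congr 1; omega
  · omega
  · congr 1; omega
  · omega

lemma pvGetD_norm {α : Type} (xs : List α) (e : Int) (d : α) (hl : xs.length = 26)
    (h1 : -26 ≤ e) (h2 : e < 26) :
    PySem.List.pyGetD xs e d = xs.getD (pvEff e) d := by
  simp [PySem.List.pyGetD, PySem.List.pyGet?, hl, pvIdx_norm e h1 h2, List.getD_eq_getElem?_getD]

lemma pvSetD_norm {α : Type} (xs : List α) (e : Int) (v : α) (hl : xs.length = 26)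
    (h1 : -26 ≤ e) (h2 : e < 26) :
    PySem.List.pySetD xs e v = xs.set (pvEff e) v := by
  simp [PySem.List.pySetD, PySem.List.pySet?, hl, pvIdx_norm e h1 h2]

lemma pvEff_lt (e : Int) : pvEff e < 26 := by simp only [pvEff]; omega

lemma pvEff_ofNat (k : Nat) (h : k < 26) : pvEff (k : Int) = k := by
  simp only [pvEff]; omega

lemma pvGetD_set {α : Type} (l : List α) (m b : Nat) (v d : α) (hm : m < l.length) :
    (l.set m v).getD b d = if m = b then v else l.getD b d := by
  simp only [List.getD_eq_getElem?_getD, List.getElem?_set]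
  split_ifs with h
  · subst h; simp [hm]
  · rfl

lemma pvSumAdd {α : Type} (l : List α) (f g : α → Nat) :
    (l.map (fun b => f b + g b)).sum = (l.map f).sum + (l.map g).sum := by
  induction l with
  | nil => simp
  | cons x l ih => simp [ih]; omega

lemma pvOneHot (e : Nat) (n : Nat) (he : e < n) :
    (((List.range n).map (fun b => if e == b then (1:Nat) else 0)).sum) = 1 := by
  induction n with
  | zero => omega
  | succ n ih =>
    rw [List.range_succ, List.map_append, List.sum_append]
    by_cases h : e = n
    · subst h
      have : ((List.range e).map (fun b => if e == b then (1:Nat) else 0)) = (List.range e).map (fun _ => 0) := by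
        apply List.map_congr_left
        intro b hb
        simp only [List.mem_range] at hb
        simp only [beq_iff_eq, if_neg (by omega : ¬ e = b)]
      rw [this]
      simp
    · rw [ih (by omega)]
      simp [h]

lemma pvE_length (A : List (Int × Int)) (hk : ∀ p ∈ A, -26 ≤ p.1 ∧ p.1 < 26) :
    (((List.range 26).flatMap (fun b => A.filter (pvFb b)))).length = A.length := by
  induction A with
  | nil => simp
  | cons p l ih =>
    have hp := hk p (by simp)
    have hk' : ∀ q ∈ l, -26 ≤ q.1 ∧ q.1 < 26 := fun q hq => hk q (by simp [hq])
    have heff : pvEff p.1 < 26 := pvEff_lt _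
    simp only [List.length_flatMap] at ih ⊢
    simp only [List.filter_cons]
    have : ∀ b ∈ List.range 26,
        (if pvFb b p then p :: l.filter (pvFb b) else l.filter (pvFb b)).length
        = (if pvEff p.1 == b then 1 else 0) + (l.filter (pvFb b)).length := by
      intro b _
      simp only [pvFb]
      split <;> simp <;> omega
    rw [List.map_congr_left this, pvSumAdd, ih hk', pvOneHot _ _ heff, List.length_cons]
    omega

lemma pvCountLoop (l : List (Int × Int)) : ∀ (C : List Int), C.length = 26 →
    (∀ p ∈ l, -26 ≤ p.1 ∧ p.1 < 26) →
    (l.foldl (fun C p => PySem.List.pySetD C p.1 (PySem.List.pyGetD C p.1 0 + 1)) C).length = 26 ∧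
    ∀ b : Nat, b < 26 →
      (l.foldl (fun C p => PySem.List.pySetD C p.1 (PySem.List.pyGetD C p.1 0 + 1)) C).getD b 0
        = C.getD b 0 + (l.countP (pvFb b) : Int) := by
  induction l with
  | nil => intro C hC hk; simp [hC]
  | cons p l ih =>
    intro C hC hk
    have hp := hk p (by simp)
    have hk' : ∀ q ∈ l, -26 ≤ q.1 ∧ q.1 < 26 := fun q hq => hk q (by simp [hq])
    simp only [List.foldl_cons]
    rw [pvSetD_norm _ _ _ hC hp.1 hp.2, pvGetD_norm _ _ _ hC hp.1 hp.2]
    have hC' : (C.set (pvEff p.1) (C.getD (pvEff p.1) 0 + 1)).length = 26 := by simp [hC]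
    obtain ⟨hlen, hval⟩ := ih _ hC' hk'
    refine ⟨hlen, ?_⟩
    intro b hb
    rw [hval b hb, pvGetD_set _ _ _ _ _ (by rw [hC]; exact pvEff_lt _), List.countP_cons]
    by_cases h : pvEff p.1 = b
    · subst h; simp [pvFb]; ring
    · simp [pvFb, h, (by simpa using h : ¬ (pvEff p.1 == b) = true)]

lemma pvPrefixLoop (C : List Int) (hC : C.length = 26) (m : Nat) (hm : m ≤ 26) :
    ((PySem.List.pyRange 1 (m : Int) 1).foldl
        (fun C i => PySem.List.pySetD C i
          (PySem.List.pyGetD C i 0 + PySem.List.pyGetD C (i - 1) 0)) C).length = 26 ∧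
    ∀ b : Nat, b < 26 →
      ((PySem.List.pyRange 1 (m : Int) 1).foldl
        (fun C i => PySem.List.pySetD C i
          (PySem.List.pyGetD C i 0 + PySem.List.pyGetD C (i - 1) 0)) C).getD b 0
      = if b < m then ((List.range (b+1)).map (fun j => C.getD j 0)).sum else C.getD b 0 := by
  induction m with
  | zero =>
    rw [PySem.List.pyRange_one_eq_nil (by norm_num)]
    simpa [hC] using fun b _ => rfl
  | succ m ih =>
    by_cases hm0 : m = 0
    · subst hm0
      rw [show (((0+1 : Nat)) : Int) = 1 by norm_num, PySem.List.pyRange_one_eq_nil (by norm_num)]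
      refine ⟨hC, ?_⟩
      intro b hb
      simp only [List.foldl_nil]
      by_cases h : b < 1
      · have : b = 0 := by omega
        subst this; simp
      · simp [h]
    · obtain ⟨hlen, hval⟩ := ih (by omega)
      rw [show ((m+1 : Nat) : Int) = (m : Int) + 1 by push_cast; ring,
        PySem.List.pyRange_one_succ_right (by exact_mod_cast Nat.one_le_iff_ne_zero.mpr hm0),
        List.foldl_append]
      simp only [List.foldl_cons, List.foldl_nil]
      set C1 := (PySem.List.pyRange 1 (m : Int) 1).foldl
          (fun C i => PySem.List.pySetD C i
            (PySem.List.pyGetD C i 0 + PySem.List.pyGetD C (i - 1) 0)) C with hC1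
      have hmlt : (m : Int) < 26 := by exact_mod_cast (by omega : m < 26)
      rw [pvSetD_norm _ _ _ hlen (by omega) hmlt,
          pvGetD_norm _ _ _ hlen (by omega) hmlt,
          show (m : Int) - 1 = ((m - 1 : Nat) : Int) by omega,
          pvGetD_norm _ _ _ hlen (by omega) (by omega),
          pvEff_ofNat m (by omega), pvEff_ofNat (m-1) (by omega)]
      constructor
      · simp [hlen]
      · intro b hb
        rw [pvGetD_set _ _ _ _ _ (by omega)]
        by_cases h : m = b
        · rw [if_pos h]
          subst h
          rw [hval m hb, if_neg (lt_irrefl m), hval (m-1) (by omega), if_pos (by omega),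
              if_pos (by omega : m < m + 1)]
          have e2 : List.range m = List.range (m-1) ++ [m-1] := by
            conv_lhs => rw [show m = (m-1) + 1 by omega]
            exact List.range_succ
          rw [List.range_succ (n := m - 1)]
          conv_rhs => rw [List.range_succ, e2]
          simp only [List.map_append, List.map_cons, List.map_nil, List.sum_append,
            List.sum_cons, List.sum_nil]
          ring
        · rw [if_neg h, hval b hb]
          by_cases h2 : b < m
          · rw [if_pos h2, if_pos (by omega)]
          · rw [if_neg h2, if_neg (by omega)]

lemma pvPlaceLoop (A : List (Int × Int)) (hk : ∀ p ∈ A, -26 ≤ p.1 ∧ p.1 < 26) :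
    ∀ (i0 : Nat), i0 ≤ A.length → ∀ (B : List (Option (Int × Int))) (C : List Int),
    B = (List.range 26).flatMap (fun b =>
        ((A.take i0).filter (pvFb b)).map (fun _ => (none : Option (Int × Int)))
        ++ ((A.drop i0).filter (pvFb b)).map some) →
    C.length = 26 →
    (∀ b : Nat, b < 26 → C.getD b 0 =
        (((List.range (b+1)).map (fun j => (A.countP (pvFb j) : Int))).sum)
        - ((A.drop i0).countP (pvFb b) : Int)) →
    ((PySem.List.pyRange ((i0 : Int) - 1) (-1) (-1)).foldl
      (fun (s : List (Option (Int × Int)) × List Int) i =>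
        let p := PySem.List.pyGetD A i (0, 0)
        (PySem.List.pySetD s.1 (PySem.List.pyGetD s.2 p.1 0 - 1) (some p),
         PySem.List.pySetD s.2 p.1 (PySem.List.pyGetD s.2 p.1 0 - 1)))
      (B, C)).1
    = ((List.range 26).flatMap (fun b => A.filter (pvFb b))).map some := by
  intro i0
  induction i0 with
  | zero =>
    intro _ B C hB hC hCv
    rw [show ((0 : Nat) : Int) - 1 = -1 by norm_num,
        PySem.List.pyRange_neg_one_eq_nil (by norm_num)]
    simp only [List.foldl_nil]
    rw [hB]
    simp [List.map_flatMap]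
  | succ i0 ih =>
    intro hle B C hB hC hCv
    have hlt : i0 < A.length := by omega
    rw [show ((i0 + 1 : Nat) : Int) - 1 = (i0 : Int) by push_cast; ring,
        PySem.List.pyRange_neg_one_cons (by omega)]
    simp only [List.foldl_cons]
    -- the processed element
    have hp : PySem.List.pyGetD A ((i0 : Nat) : Int) (0, 0) = A[i0] := by
      rw [PySem.List.pyGetD_of_nonneg _ _ (by positivity)]
      simp [List.getD_eq_getElem?_getD, List.getElem?_eq_getElem hlt]
    have hke := hk (A[i0]) (List.getElem_mem hlt)
    -- abbreviations
    set m' : Nat := pvEff (A[i0]).1 with hm'def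
    have hm' : m' < 26 := pvEff_lt _
    set tc : Nat := (A.take (i0+1)).countP (pvFb m') with htcdef
    set dc : Nat := (A.drop (i0+1)).countP (pvFb m') with hdcdef
    set pre : Nat := ((List.range m').map (fun j => A.countP (pvFb j))).sum with hpredef
    -- take/drop decompositions
    have hd : A.drop i0 = A[i0] :: A.drop (i0+1) := List.drop_eq_getElem_cons hlt
    have hfm : pvFb m' A[i0] = true := by
      simp [pvFb, ← hm'def]
    have hfne : ∀ b : Nat, b ≠ m' → pvFb b A[i0] = false := by
      intro b hb
      simp only [pvFb, ← hm'def, beq_eq_false_iff_ne]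
      exact fun h => hb h.symm
    have htake : ∀ b : Nat, (A.take (i0+1)).filter (pvFb b)
        = (A.take i0).filter (pvFb b) ++ (if pvFb b A[i0] then [A[i0]] else []) := by
      intro b
      rw [List.take_succ, List.getElem?_eq_getElem hlt, List.filter_append]
      simp [List.filter_cons]
    have htc1 : 1 ≤ tc := by
      rw [htcdef, List.countP_eq_length_filter, htake m', hfm]
      simp
    have hcnt : A.countP (pvFb m') = tc + dc := by
      conv_lhs => rw [← List.take_append_drop (i0+1) A]
      rw [List.countP_append]
    -- the written position
    have hcast : ((List.range m').map (fun j => (A.countP (pvFb j) : Int))).sum = (pre : Int) := by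
      rw [hpredef, Nat.cast_list_sum, List.map_map]
      rfl
    have hSig : ((List.range (m'+1)).map (fun j => (A.countP (pvFb j) : Int))).sum
        = (pre : Int) + (tc : Int) + (dc : Int) := by
      rw [List.range_succ, List.map_append, List.sum_append]
      simp only [List.map_cons, List.map_nil, List.sum_cons, List.sum_nil]
      rw [hcast, hcnt]
      push_cast
      ring
    have hw : C.getD m' 0 - 1 = ((pre + tc - 1 : Nat) : Int) := by
      rw [hCv m' hm', hSig]
      push_cast
      omega
    -- normalise the two pySetD / pyGetD of the step
    rw [hp, pvGetD_norm _ _ _ hC hke.1 hke.2, pvSetD_norm _ _ _ hC hke.1 hke.2, ← hm'def]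
    rw [hw, PySem.List.pySetD_of_nonneg _ _ (by positivity), Int.toNat_natCast]
    -- bucket-range decomposition
    have hsplit : List.range 26 = (List.range m' ++ [m']) ++ (List.range (26 - (m'+1))).map (fun k => (m'+1) + k) := by
      rw [← List.range_succ, ← List.range_add]
      congr 1
      omega
    have hblk_len : ∀ b : Nat,
        (((A.take (i0+1)).filter (pvFb b)).map (fun _ => (none : Option (Int × Int)))
          ++ ((A.drop (i0+1)).filter (pvFb b)).map some).length = A.countP (pvFb b) := by
      intro b
      simp only [List.length_append, List.length_map, List.countP_eq_length_filter]
      conv_rhs => rw [← List.take_append_drop (i0+1) A, List.filter_append, List.length_append]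
    have hstable : ∀ b : Nat, b ≠ m' →
        ((A.take (i0+1)).filter (pvFb b)) = ((A.take i0).filter (pvFb b))
        ∧ ((A.drop (i0+1)).filter (pvFb b)) = ((A.drop i0).filter (pvFb b)) := by
      intro b hb
      constructor
      · rw [htake b, hfne b hb]
        simp
      · rw [hd, List.filter_cons, hfne b hb]
        simp
    -- apply the induction hypothesis at stage i0
    refine ih (by omega) _ _ ?_ ?_ ?_
    · -- the new B equals the stage-i0 block decomposition
      have hFlen : (List.flatMap (fun b =>
            ((A.take (i0+1)).filter (pvFb b)).map (fun _ => (none : Option (Int × Int)))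
            ++ ((A.drop (i0+1)).filter (pvFb b)).map some) (List.range m')).length = pre := by
        rw [List.length_flatMap, hpredef]
        congr 1
        exact List.map_congr_left (fun b _ => hblk_len b)
      have hnlen : (((A.take (i0+1)).filter (pvFb m')).map (fun _ => (none : Option (Int × Int)))).length = tc := by
        simp only [List.length_map, ← List.countP_eq_length_filter]
        exact htcdef.symm
      have htc0 : (A.take i0).countP (pvFb m') = tc - 1 := by
        rw [htcdef, List.countP_eq_length_filter, List.countP_eq_length_filter, htake m', hfm]
        simp
      have hrep1 : (((A.take (i0+1)).filter (pvFb m')).map (fun _ => (none : Option (Int × Int)))) = List.replicate tc none := by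
        rw [List.map_const']
        rw [show ((A.take (i0+1)).filter (pvFb m')).length = tc from by
          rw [← List.countP_eq_length_filter]]
      have hrep0 : (((A.take i0).filter (pvFb m')).map (fun _ => (none : Option (Int × Int)))) = List.replicate (tc-1) none := by
        rw [List.map_const']
        rw [show ((A.take i0).filter (pvFb m')).length = tc - 1 from by
          rw [← List.countP_eq_length_filter, htc0]]
      have hsetrep : (List.replicate tc (none : Option (Int × Int))).set (tc-1) (some A[i0])
          = List.replicate (tc-1) none ++ [some A[i0]] := by
        conv_lhs => rw [show tc = (tc-1)+1 from by omega, List.replicate_succ']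
        rw [List.set_append, List.length_replicate, if_neg (by omega),
            show tc - 1 + 1 - 1 - (tc - 1) = 0 from by omega, List.set_cons_zero]
      rw [hB, hsplit]
      simp only [List.flatMap_append, List.flatMap_singleton]
      rw [List.append_assoc, List.set_append, hFlen, if_neg (by omega),
          show pre + tc - 1 - pre = tc - 1 from by omega,
          List.set_append, hblk_len m', hcnt, if_pos (by omega),
          List.set_append, hnlen, if_pos (by omega),
          hrep1, hsetrep, ← hrep0]
      -- unchanged buckets
      have hF : List.flatMap (fun b =>
            ((A.take (i0+1)).filter (pvFb b)).map (fun _ => (none : Option (Int × Int)))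
            ++ ((A.drop (i0+1)).filter (pvFb b)).map some) (List.range m')
          = List.flatMap (fun b =>
            ((A.take i0).filter (pvFb b)).map (fun _ => (none : Option (Int × Int)))
            ++ ((A.drop i0).filter (pvFb b)).map some) (List.range m') := by
        refine List.flatMap_congr (fun b hb => ?_)
        have hbne : b ≠ m' := by simp only [List.mem_range] at hb; omega
        rw [(hstable b hbne).1, (hstable b hbne).2]
      have hG : List.flatMap (fun b =>
            ((A.take (i0+1)).filter (pvFb b)).map (fun _ => (none : Option (Int × Int)))
            ++ ((A.drop (i0+1)).filter (pvFb b)).map some) ((List.range (26 - (m'+1))).map (fun k => (m'+1) + k))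
          = List.flatMap (fun b =>
            ((A.take i0).filter (pvFb b)).map (fun _ => (none : Option (Int × Int)))
            ++ ((A.drop i0).filter (pvFb b)).map some) ((List.range (26 - (m'+1))).map (fun k => (m'+1) + k)) := by
        refine List.flatMap_congr (fun b hb => ?_)
        have hbne : b ≠ m' := by
          simp only [List.mem_map, List.mem_range] at hb
          obtain ⟨k, _, hk⟩ := hb
          omega
        rw [(hstable b hbne).1, (hstable b hbne).2]
      have hdm : ((A.drop i0).filter (pvFb m')).map some
          = some A[i0] :: ((A.drop (i0+1)).filter (pvFb m')).map some := by
        rw [hd, List.filter_cons, hfm]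
        simp
      rw [hF, hG, hdm]
      simp [List.append_assoc]
    · simp [hC]
    · intro b hb
      rw [pvGetD_set _ _ _ _ _ (by rw [hC]; exact hm')]
      by_cases hbm : m' = b
      · subst hbm
        rw [if_pos rfl, hSig, hd, List.countP_cons, hfm]
        simp only [if_pos rfl]
        push_cast
        omega
      · rw [if_neg hbm, hCv b hb, hd, List.countP_cons, hfne b (fun h => hbm h.symm)]
        simp

lemma pvCountingSort_eq (A : List (Int × Int)) (hk : ∀ p ∈ A, -26 ≤ p.1 ∧ p.1 < 26) :
    countingSort A 26 = ((List.range 26).flatMap (fun b => A.filter (pvFb b))).map some := by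
  have hB0 : ((PySem.List.pyRange 0 ((A.length : Int)) 1).map (fun _ => (none : Option (Int × Int))))
      = List.replicate A.length none := by
    rw [PySem.List.pyRange_zero, List.map_map]
    simp only [Function.comp_def]
    rw [List.map_const']
    simp
  have hC0 : ((PySem.List.pyRange 0 (26 : Int) 1).map (fun _ => (0 : Int))) = List.replicate 26 0 := by
    rw [PySem.List.pyRange_zero, List.map_map]
    simp only [Function.comp_def]
    rw [List.map_const']
    simp
  obtain ⟨hC1len, hC1⟩ := pvCountLoop A (List.replicate 26 0) (by simp) hk
  obtain ⟨hC2len, hC2⟩ := pvPrefixLoop _ hC1len 26 (le_refl 26)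
  simp only [countingSort]
  rw [hB0, hC0]
  rw [show ((26 : Nat) : Int) = (26 : Int) from rfl] at hC2len hC2
  refine pvPlaceLoop A hk A.length (le_refl _) _ _ ?_ hC2len ?_
  · refine (List.eq_replicate_iff.mpr ⟨?_, ?_⟩).symm
    · simp only [List.take_length, List.drop_length, List.filter_nil, List.map_nil,
        List.append_nil, List.length_flatMap, List.length_map]
      have := pvE_length A hk
      rw [List.length_flatMap] at this
      exact this
    · intro z hz
      simp only [List.take_length, List.drop_length, List.filter_nil, List.map_nil,
        List.append_nil, List.mem_flatMap, List.mem_map] at hz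
      obtain ⟨b, _, _, _, hzz⟩ := hz
      exact hzz.symm
  · intro b hb
    rw [hC2 b hb, if_pos hb]
    simp only [List.drop_length, List.countP_nil, Nat.cast_zero, sub_zero]
    refine congrArg List.sum ?_
    apply List.map_congr_left
    intro j hj
    simp only [List.mem_range] at hj
    rw [hC1 j (by omega), List.getD_replicate _ (by omega)]
    ring

lemma pvBucketLoop (l : List (Int × Char)) : ∀ (P : List (List Int)), P.length = 26 →
    (∀ p ∈ l, -26 ≤ ((p.2.toNat : Int) - 97) ∧ ((p.2.toNat : Int) - 97) < 26) →
    l.foldl (fun P p =>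
        PySem.List.pySetD P ((p.2.toNat : Int) - 97)
          (PySem.List.pyGetD P ((p.2.toNat : Int) - 97) [] ++ [p.1])) P
    = (List.range 26).map (fun b => P.getD b [] ++ (l.filter (pvFc b)).map (fun p => p.1)) := by
  induction l with
  | nil =>
    intro P hP _
    simp only [List.foldl_nil, List.filter_nil, List.map_nil, List.append_nil]
    refine List.ext_getElem (by simp [hP]) ?_
    intro i h1 h2
    simp only [List.getElem_map, List.getElem_range]
    rw [List.getD_eq_getElem?_getD, List.getElem?_eq_getElem h1]
    rfl
  | cons q l ih =>
    intro P hP hk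
    have hq := hk q (by simp)
    have hk' : ∀ p ∈ l, -26 ≤ ((p.2.toNat : Int) - 97) ∧ ((p.2.toNat : Int) - 97) < 26 :=
      fun p hp => hk p (by simp [hp])
    simp only [List.foldl_cons]
    rw [pvSetD_norm _ _ _ hP hq.1 hq.2, pvGetD_norm _ _ _ hP hq.1 hq.2]
    rw [ih _ (by simp [hP]) hk']
    apply List.map_congr_left
    intro b hb
    simp only [List.mem_range] at hb
    rw [pvGetD_set _ _ _ _ _ (by rw [hP]; exact pvEff_lt _), List.filter_cons]
    by_cases h : pvEff ((q.2.toNat : Int) - 97) = b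
    · subst h
      rw [if_pos rfl, if_pos (by simp [pvFc])]
      simp [List.append_assoc]
    · rw [if_neg h, if_neg (by simp [pvFc, h])]

lemma pvEnum (cs : List Char) :
    PySem.List.enumerate cs 0
      = (List.range cs.length).map (fun (k : Nat) => ((k : Int), cs.getD k ' ')) := by
  rw [PySem.List.enumerate_eq_map_pyRange cs ' ']
  simp only [PySem.List.len, PySem.List.pyRange_zero_nat, List.map_map]
  apply List.map_congr_left
  intro k _
  simp [PySem.List.pyGetD_natCast]

lemma pvBuckets_flatten (cs : List Char) (hc : ∀ c ∈ cs, 71 ≤ c.toNat ∧ c.toNat ≤ 122) :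
    (bucketPositions cs).flatten = (pvE cs).map (fun p => p.2) := by
  have hmem : ∀ k : Nat, k < cs.length → 71 ≤ (cs.getD k ' ').toNat ∧ (cs.getD k ' ').toNat ≤ 122 := by
    intro k hkk
    refine hc _ ?_
    rw [List.getD_eq_getElem?_getD, List.getElem?_eq_getElem hkk]
    exact List.getElem_mem hkk
  have hbounds : ∀ p ∈ PySem.List.enumerate cs 0,
      -26 ≤ ((p.2.toNat : Int) - 97) ∧ ((p.2.toNat : Int) - 97) < 26 := by
    intro p hp
    rw [pvEnum, List.mem_map] at hp
    obtain ⟨k, hk, rfl⟩ := hp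
    simp only [List.mem_range] at hk
    have := hmem k hk
    dsimp only
    omega
  rw [bucketPositions, pvBucketLoop _ _ (by simp) hbounds]
  have h1 : (List.range 26).map (fun b => (List.replicate 26 ([] : List Int)).getD b []
        ++ ((PySem.List.enumerate cs 0).filter (pvFc b)).map (fun p => p.1))
      = (List.range 26).map (fun b => ((PySem.List.enumerate cs 0).filter (pvFc b)).map (fun p => p.1)) := by
    apply List.map_congr_left
    intro b hb
    simp only [List.mem_range] at hb
    rw [List.getD_replicate _ hb]
    simp
  rw [h1, ← List.flatMap_def, pvE, List.map_flatMap]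
  refine List.flatMap_congr (fun b _ => ?_)
  have hkey : pvKeyed cs = (PySem.List.enumerate cs 0).map (fun p => (((p.2.toNat : Int) - 97), p.1)) := by
    rw [pvEnum, List.map_map, pvKeyed]
    rfl
  rw [hkey, List.filter_map, List.map_map]
  rfl

lemma pvAs (cs : List Char) :
    ((PySem.List.pyRange 0 ((cs.length : Int)) 1).map
        (fun i => (((PySem.List.pyGetD cs i ' ').toNat : Int) - 97, i)))
    = pvKeyed cs := by
  rw [PySem.List.pyRange_zero_nat, List.map_map, pvKeyed]
  apply List.map_congr_left
  intro k _
  simp [PySem.List.pyGetD_natCast]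

lemma pvKeyed_bounds (cs : List Char) (hc : ∀ c ∈ cs, 71 ≤ c.toNat ∧ c.toNat ≤ 122) :
    ∀ p ∈ pvKeyed cs, -26 ≤ p.1 ∧ p.1 < 26 := by
  intro p hp
  rw [pvKeyed, List.mem_map] at hp
  obtain ⟨j, hj, rfl⟩ := hp
  simp only [List.mem_range] at hj
  have : cs.getD j ' ' ∈ cs := by
    rw [List.getD_eq_getElem?_getD, List.getElem?_eq_getElem hj]
    exact List.getElem_mem hj
  have := hc _ this
  simp only
  omega

lemma pvFinal (u v : List (Int × Int)) (n : Nat) (t : Int) (hu : u.length = n) (hv : v.length = n) :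
    ((PySem.List.pyRange 0 (n : Int) 1).all (fun i =>
       match PySem.List.pyGetD (u.map some) i none, PySem.List.pyGetD (v.map some) i none with
       | some p, some q => decide (¬ (|p.2 - q.2| > t))
       | _, _ => true))
    = (((u.map (fun p => p.2)).zip (v.map (fun p => p.2))).all (fun p => decide (|p.1 - p.2| ≤ t))) := by
  have hget : ∀ (w : List (Int × Int)) (k : Nat) (hkw : k < w.length),
      PySem.List.pyGetD (w.map some) ((k : Nat) : Int) none = some (w[k]'hkw) := by
    intro w k hkw
    rw [PySem.List.pyGetD_natCast, List.getD_eq_getElem?_getD, List.getElem?_map,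
      List.getElem?_eq_getElem hkw]
    rfl
  rw [Bool.eq_iff_iff, List.all_eq_true, List.all_eq_true]
  constructor
  · intro h p hp
    rw [List.mem_iff_getElem] at hp
    obtain ⟨k, hk, rfl⟩ := hp
    have hkn : k < n := by
      simp only [List.length_zip, List.length_map, hu, hv] at hk
      omega
    have hh := h ((k : Nat) : Int) (by
      rw [PySem.List.mem_pyRange_one]
      constructor
      · positivity
      · exact_mod_cast hkn)
    rw [hget u k (by omega), hget v k (by omega)] at hh
    rw [List.getElem_zip]
    simp only [List.getElem_map]
    simp only [decide_eq_true_eq] at hh ⊢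
    omega
  · intro h i hi
    rw [PySem.List.mem_pyRange_one] at hi
    obtain ⟨hi0, hin⟩ := hi
    have hi' : i = ((i.toNat : Nat) : Int) := by omega
    have hkn : i.toNat < n := by omega
    rw [hi', hget u _ (by omega), hget v _ (by omega)]
    have hmem : ((u.map (fun p => p.2))[i.toNat]'(by simp; omega),
        (v.map (fun p => p.2))[i.toNat]'(by simp; omega))
        ∈ (u.map (fun p => p.2)).zip (v.map (fun p => p.2)) := by
      rw [← List.getElem_zip (h := by simp [List.length_zip]; omega)]
      exact List.getElem_mem _
    have hh := h _ hmem
    simp only [List.getElem_map, decide_eq_true_eq] at hh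
    simp only [decide_eq_true_eq]
    omega

-- ===== VERDICT (by name: the statement is the Claim_ definition above) =====
theorem tanagram_spec : Claim_equal_tanagram := by
  intro x y t hdom hpre
  unfold Spec_tanagram
  by_cases hl : PySem.Str.len x = PySem.Str.len y
  · have hxy : x.toList.length = y.toList.length := by
      have h2 := hl
      rw [PySem.Str.len_eq, PySem.Str.len_eq] at h2
      exact_mod_cast h2
    have hchars := hpre.resolve_left (not_not_intro hl)
    rw [List.all_eq_true] at hchars
    have hcx : ∀ c ∈ x.toList, 71 ≤ c.toNat ∧ c.toNat ≤ 122 := by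
      intro c hc
      have h3 := hchars c (by simp [hc])
      simpa using h3
    have hcy : ∀ c ∈ y.toList, 71 ≤ c.toNat ∧ c.toNat ≤ 122 := by
      intro c hc
      have h3 := hchars c (by simp [hc])
      simpa using h3
    unfold tanagram tanagram_alt
    rw [if_neg (not_not_intro hl), if_neg (not_not_intro hl)]
    simp only [PySem.Str.len_eq]
    rw [pvAs x.toList, show ((x.toList.length : Int)) = ((y.toList.length : Int)) from by
      exact_mod_cast hxy]
    rw [pvAs y.toList]
    rw [pvCountingSort_eq _ (pvKeyed_bounds _ hcx), pvCountingSort_eq _ (pvKeyed_bounds _ hcy)]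
    rw [pvBuckets_flatten x.toList hcx, pvBuckets_flatten y.toList hcy]
    refine pvFinal _ _ (y.toList.length) t ?_ ?_
    · rw [pvE_length _ (pvKeyed_bounds _ hcx), pvKeyed, List.length_map, List.length_range]
      exact hxy
    · rw [pvE_length _ (pvKeyed_bounds _ hcy), pvKeyed, List.length_map, List.length_range]
  · unfold tanagram tanagram_alt
    rw [if_pos hl, if_pos hl]
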